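-- pv_equiv track=rewrite | github.com/balalaika-tools/dotsOCR | src/dotsOCR/core/md_transform.py | _extract_top_level_json_values
-- ===== SOURCE A (Python) =====
-- def _extract_top_level_json_values(text: str) -> list[str]:
--     """
--     Extract one or more top-level JSON values from a string.
--     This is resilient to outputs like: `[...] [...]` or `{...}\n{...}`.
--     """
--     s = (text or "").strip()
--     out: list[str] = []
--     i = 0
--     n = len(s)
--
--     def _skip_ws(idx: int) -> int:
--         while idx < n and s[idx].isspace():
--             idx += 1
--         return idx
--
--     i = _skip_ws(i)
--     while i < n:
--         if s[i] not in "[{":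
--             # Find the next potential JSON start.
--             j = i + 1
--             while j < n and s[j] not in "[{":
--                 j += 1
--             i = _skip_ws(j)
--             continue
--
--         start = i
--         stack: list[str] = [s[i]]
--         i += 1
--         in_str = False
--         esc = False
--
--         while i < n and stack:
--             ch = s[i]
--             if in_str:
--                 if esc:
--                     esc = False
--                 elif ch == "\\":
--                     esc = True
--                 elif ch == '"':
--                     in_str = False
--             else:
--                 if ch == '"':
--                     in_str = True
--                 elif ch in "[{":
--                     stack.append(ch)
--                 elif ch == "]":
--                     if stack and stack[-1] == "[":
--                         stack.pop()
--                 elif ch == "}":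
--                     if stack and stack[-1] == "{":
--                         stack.pop()
--             i += 1
--
--         if not stack:
--             out.append(s[start:i].strip())
--         i = _skip_ws(i)
--
--     return out
-- ===== SOURCE B (Python) =====
-- def _extract_top_level_json_values(text: str) -> list[str]:
--     """Extract one or more top-level JSON values from a string (recursive-descent version)."""
--     s = (text or "").strip()
--     n = len(s)
--
--     def parse_value(idx: int) -> tuple[int, bool]:
--         # s[idx] is '[' or '{'; return (index just past the value, True) or (n, False) if unclosed.
--         closer = "]" if s[idx] == "[" else "}"
--         idx += 1
--         while idx < n:
--             ch = s[idx]
--             if ch == '"':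
--                 idx += 1
--                 while idx < n:
--                     c = s[idx]
--                     idx += 1
--                     if c == "\\":
--                         idx += 1
--                     elif c == '"':
--                         break
--             elif ch in "[{":
--                 idx, closed = parse_value(idx)
--                 if not closed:
--                     return n, False
--             elif ch == closer:
--                 return idx + 1, True
--             else:
--                 idx += 1
--         return n, False
--
--     out: list[str] = []
--     i = 0
--     while i < n:
--         if s[i] in "[{":
--             end, closed = parse_value(i)
--             if not closed:
--                 break
--             out.append(s[i:end].strip())
--             i = end
--         else:
--             i += 1
--     return out
-- ===== Notes on version B (the rewrite author's own statement) =====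
-- stated objective: alternative
-- what changed: Replaces A's single flat scan with an explicit opener stack and in_str/esc character flags by a recursive-descent parse_value helper (nesting lives in the call stack, strings consumed by an inner loop) plus a simple one-char-at-a-time outer skip instead of A's find-next/skip-ws loops.
import Mathlib
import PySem

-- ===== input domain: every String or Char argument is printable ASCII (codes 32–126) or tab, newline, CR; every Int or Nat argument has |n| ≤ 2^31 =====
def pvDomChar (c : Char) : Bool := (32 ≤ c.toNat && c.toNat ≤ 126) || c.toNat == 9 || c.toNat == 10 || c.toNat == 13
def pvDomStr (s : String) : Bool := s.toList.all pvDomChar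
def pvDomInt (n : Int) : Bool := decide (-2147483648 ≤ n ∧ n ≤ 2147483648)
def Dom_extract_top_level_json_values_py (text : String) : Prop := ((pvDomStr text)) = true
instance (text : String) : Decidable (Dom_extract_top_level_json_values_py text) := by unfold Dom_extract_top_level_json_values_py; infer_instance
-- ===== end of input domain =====

-- B is an ALTERNATIVE decomposition (recursive descent instead of an explicit opener stack), same cost; return values proved equal.

-- ===== PORT A =====
-- A scans with indices i < n; the ports recurse on the remaining SUFFIX of the character
-- list (the same traversal, one character per step); slices s[start:i] become 'take'.

-- while idx < n and s[idx].isspace(): idx += 1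
def aSkipWs : List Char → List Char
  | [] => []
  | c :: r => if PySem.Chars.isspace c then aSkipWs r else c :: r

-- j = i + 1; while j < n and s[j] not in "[{": j += 1
def aFindNext : List Char → List Char
  | [] => []
  | c :: r => if c = '[' ∨ c = '{' then c :: r else aFindNext r

-- the inner 'while i < n and stack' loop; the Python stack's top (last element) is the HEAD here
def aLoop : List Char → List Char → Bool → Bool → List Char × List Char
  | [], stack, _, _ => ([], stack)
  | c :: r, stack, instr, esc =>
    if stack = [] then (c :: r, stack)
    else if instr then
      if esc then aLoop r stack true false
      else if c = '\\' then aLoop r stack true true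
      else if c = '"' then aLoop r stack false esc
      else aLoop r stack instr esc
    else
      if c = '"' then aLoop r stack true esc
      else if c = '[' ∨ c = '{' then aLoop r (c :: stack) instr esc
      else if c = ']' then aLoop r (if stack.head? = some '[' then stack.tail else stack) instr esc
      else if c = '}' then aLoop r (if stack.head? = some '{' then stack.tail else stack) instr esc
      else aLoop r stack instr esc

theorem aSkipWs_le (l : List Char) : (aSkipWs l).length ≤ l.length := by
  induction l with
  | nil => simp [aSkipWs]
  | cons c r ih => simp only [aSkipWs]; split <;> simp_all; omega

theorem aFindNext_le (l : List Char) : (aFindNext l).length ≤ l.length := by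
  induction l with
  | nil => simp [aFindNext]
  | cons c r ih => simp only [aFindNext]; split <;> simp_all; omega

theorem aLoop_le (l : List Char) : ∀ stack instr esc, (aLoop l stack instr esc).1.length ≤ l.length := by
  induction l with
  | nil => intro stack instr esc; simp [aLoop]
  | cons c r ih =>
    intro stack instr esc
    simp only [aLoop]
    split
    · simp
    · split
      · split
        · exact le_trans (ih _ _ _) (by simp)
        · split
          · exact le_trans (ih _ _ _) (by simp)
          · split <;> exact le_trans (ih _ _ _) (by simp)
      · split
        · exact le_trans (ih _ _ _) (by simp)
        · split
          · exact le_trans (ih _ _ _) (by simp)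
          · split
            · exact le_trans (ih _ _ _) (by simp)
            · split <;> exact le_trans (ih _ _ _) (by simp)

-- the outer 'while i < n' loop
def aOuter : List Char → List String
  | [] => []
  | c :: r =>
    if c = '[' ∨ c = '{' then
      let p := aLoop r [c] false false
      if p.2 = [] then
        PySem.Str.strip (String.ofList ((c :: r).take ((c :: r).length - p.1.length)))
          :: aOuter (aSkipWs p.1)
      else aOuter (aSkipWs p.1)
    else aOuter (aSkipWs (aFindNext r))
termination_by l => l.length
decreasing_by
  · exact lt_of_le_of_lt (le_trans (aSkipWs_le _) (aLoop_le _ _ _ _)) (by simp)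
  · exact lt_of_le_of_lt (le_trans (aSkipWs_le _) (aLoop_le _ _ _ _)) (by simp)
  · exact lt_of_le_of_lt (le_trans (aSkipWs_le _) (aFindNext_le _)) (by simp)

def extract_top_level_json_values_py (text : String) : List String :=
  aOuter (aSkipWs (PySem.Str.strip text).toList)

-- ===== PORT B =====

-- the inner string-consuming loop of parse_value
def bSkipStr : List Char → List Char
  | [] => []
  | c :: r =>
    if c = '\\' then
      match r with
      | [] => []
      | _ :: r' => bSkipStr r'
    else if c = '"' then r
    else bSkipStr r

-- parse_value: s[idx] already consumed as the opener 'op'; returns (suffix after the value, closed?).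
-- Fuel only makes the nested recursion structural; callers pass fuel > length, which never runs out.
def bParse : Nat → Char → List Char → List Char × Bool
  | 0, _, _ => ([], false)
  | f + 1, op, l =>
    match l with
    | [] => ([], false)
    | c :: r =>
      if c = '"' then bParse f op (bSkipStr r)
      else if c = '[' ∨ c = '{' then
        match bParse f c r with
        | (rem, true) => bParse f op rem
        | (_, false) => ([], false)
      else if c = (if op = '[' then ']' else '}') then (r, true)
      else bParse f op r

theorem bSkipStr_le (l : List Char) : (bSkipStr l).length ≤ l.length := by
  induction l using bSkipStr.induct with
  | case1 => exact Nat.le.refl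
  | case2 => rw [bSkipStr.eq_def]; simp
  | case3 head r' ih => rw [bSkipStr.eq_def]; simp; omega
  | case4 r' h => rw [bSkipStr.eq_def]; simp
  | case5 head r' h h2 ih =>
    rw [bSkipStr.eq_def]
    simp only [if_neg h, if_neg h2, List.length_cons]
    omega

theorem bParse_le (f : Nat) : ∀ op l, (bParse f op l).1.length ≤ l.length := by
  induction f with
  | zero => intro op l; simp [bParse]
  | succ f ih =>
    intro op l
    match l with
    | [] => simp [bParse]
    | c :: r =>
      simp only [bParse]
      split
      · exact le_trans (le_trans (ih _ _) (bSkipStr_le r)) (by simp)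
      · split
        · split
          · next rem heq =>
            have h1 := ih op rem
            have h2 := ih c r
            rw [heq] at h2
            simp at h2 ⊢
            omega
          · simp
        · by_cases hc : c = (if op = '[' then ']' else '}')
          · simp [hc]
          · simp only [if_neg hc]
            exact le_trans (ih op r) (by simp)

-- the outer scan: skip to the next '[' or '{' one character at a time
def bOuter : List Char → List String
  | [] => []
  | c :: r =>
    if c = '[' ∨ c = '{' then
      let p := bParse (r.length + 1) c r
      if p.2 then
        PySem.Str.strip (String.ofList ((c :: r).take ((c :: r).length - p.1.length)))
          :: bOuter p.1
      else []
    else bOuter r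
termination_by l => l.length
decreasing_by
  · exact lt_of_le_of_lt (bParse_le _ _ _) (by simp)
  · simp

def extract_top_level_json_values_py_alt (text : String) : List String :=
  bOuter (PySem.Str.strip text).toList

-- ===== PRECONDITION & SPEC =====
def Spec_extract_top_level_json_values_py (text : String) (out : List String) : Prop := out = extract_top_level_json_values_py_alt text
instance (text : String) (out : List String) : Decidable (Spec_extract_top_level_json_values_py text out) := by unfold Spec_extract_top_level_json_values_py; infer_instance

-- ===== CLAIM (what is proved, stated in full; the proofs are below) =====
def Claim_equal_extract_top_level_json_values_py : Prop := ∀ (text : String), Dom_extract_top_level_json_values_py text → Spec_extract_top_level_json_values_py text (extract_top_level_json_values_py text)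

-- ===== LEMMAS AND PROOFS =====

-- A's loop with an empty stack exits at once
theorem aLoop_nil (l : List Char) (instr esc : Bool) : aLoop l [] instr esc = (l, []) := by
  cases l <;> simp [aLoop]

-- A's in-string scanning = B's bSkipStr
theorem str_corr (l : List Char) : ∀ stack, stack ≠ [] →
    aLoop l stack true false = aLoop (bSkipStr l) stack false false := by
  induction hn : l.length using Nat.strong_induction_on generalizing l with
  | _ n ih =>
    subst hn
    cases l with
    | nil => intro stack hst; rfl
    | cons c r =>
      intro stack hst
      rw [bSkipStr.eq_def]
      by_cases hb : c = '\\'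
      · subst hb
        simp only [aLoop, if_neg hst, if_true]
        cases r with
        | nil => simp [aLoop]
        | cons d r' =>
          simp only [aLoop, if_neg hst]
          exact ih r'.length (by simp) r' rfl stack hst
      · by_cases hq : c = '"'
        · subst hq
          simp [aLoop, if_neg hst, hb]
        · simp only [aLoop, if_neg hst, if_neg hb, if_neg hq, if_true]
          exact ih r.length (by simp) r rfl stack hst

-- core correspondence: A's stack loop against B's recursive descent
theorem main_corr (f : Nat) : ∀ (l : List Char) (op : Char) (st rem : List Char) (b : Bool),
    (op = '[' ∨ op = '{') → l.length ≤ f → bParse f op l = (rem, b) →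
    (b = true → aLoop l (op :: st) false false = aLoop rem st false false) ∧
    (b = false → (aLoop l (op :: st) false false).1 = [] ∧ (aLoop l (op :: st) false false).2 ≠ []) := by
  induction f with
  | zero =>
    intro l op st rem b hop hlen heq
    have hl : l = [] := by cases l <;> simp_all
    subst hl
    simp only [bParse] at heq
    obtain ⟨rfl, rfl⟩ : rem = [] ∧ b = false := by simp_all
    exact ⟨by simp, fun _ => ⟨rfl, by simp [aLoop]⟩⟩
  | succ f ih =>
    intro l op st rem b hop hlen heq
    cases l with
    | nil =>
      simp only [bParse] at heq
      obtain ⟨rfl, rfl⟩ : rem = [] ∧ b = false := by simp_all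
      exact ⟨by simp, fun _ => ⟨rfl, by simp [aLoop]⟩⟩
    | cons c r =>
      have hlen' : r.length ≤ f := by simp at hlen; omega
      have hne : (op :: st) ≠ ([] : List Char) := by simp
      simp only [bParse] at heq
      by_cases hq : c = '"'
      · subst hq
        rw [if_pos rfl] at heq
        have hstep : aLoop ('"' :: r) (op :: st) false false
            = aLoop (bSkipStr r) (op :: st) false false := by
          rw [show aLoop ('"' :: r) (op :: st) false false
              = aLoop r (op :: st) true false from by simp [aLoop]]
          exact str_corr r (op :: st) hne
        rw [hstep]
        exact ih (bSkipStr r) op st rem b hop (le_trans (bSkipStr_le r) hlen') heq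
      · rw [if_neg hq] at heq
        by_cases hopc : c = '[' ∨ c = '{'
        · rw [if_pos hopc] at heq
          have hstep : aLoop (c :: r) (op :: st) false false
              = aLoop r (c :: op :: st) false false := by
            simp [aLoop, hq, hopc]
          rcases h2 : bParse f c r with ⟨rem2, b2⟩
          rw [h2] at heq
          cases b2 with
          | true =>
            have e1 := (ih r c (op :: st) rem2 true hopc hlen' h2).1 rfl
            have hr2 : rem2.length ≤ f := by
              have := bParse_le f c r; rw [h2] at this; exact le_trans this hlen'
            have e2 := ih rem2 op st rem b hop hr2 heq
            rw [hstep, e1]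
            exact e2
          | false =>
            obtain ⟨rfl, rfl⟩ : rem = [] ∧ b = false := by simp_all
            have e1 := (ih r c (op :: st) rem2 false hopc hlen' h2).2 rfl
            rw [hstep]
            exact ⟨by simp, fun _ => e1⟩
        · rw [if_neg hopc] at heq
          by_cases hcl : c = (if op = '[' then ']' else '}')
          · rw [if_pos hcl] at heq
            obtain ⟨rfl, rfl⟩ : rem = r ∧ b = true := by
              constructor <;> [exact (Prod.mk.injEq .. ▸ heq).1.symm; exact (Prod.mk.injEq .. ▸ heq).2.symm]
            refine ⟨fun _ => ?_, by simp⟩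
            rcases hop with h | h <;> subst h <;> simp_all [aLoop]
          · rw [if_neg hcl] at heq
            have hstep : aLoop (c :: r) (op :: st) false false
                = aLoop r (op :: st) false false := by
              rcases hop with h | h <;> subst h <;>
                by_cases hb1 : c = ']' <;> by_cases hb2 : c = '}' <;>
                  simp_all [aLoop]
            rw [hstep]
            exact ih r op st rem b hop hlen' heq

theorem skipWs_findNext (l : List Char) : aSkipWs (aFindNext l) = aFindNext l := by
  induction l with
  | nil => rfl
  | cons c r ih =>
    by_cases hop : c = '[' ∨ c = '{'
    · have hsp : PySem.Chars.isspace c = false := by rcases hop with h | h <;> subst h <;> decide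
      simp [aFindNext, hop, aSkipWs, hsp]
    · simpa [aFindNext, hop] using ih

theorem aOuter_skipWs_findNext (l : List Char) : aOuter (aSkipWs l) = aOuter (aFindNext l) := by
  induction hn : l.length using Nat.strong_induction_on generalizing l with
  | _ n ih =>
    subst hn
    cases l with
    | nil => rfl
    | cons c r =>
      by_cases hsp : PySem.Chars.isspace c = true
      · have hop : ¬ (c = '[' ∨ c = '{') := by
          rintro (h | h) <;> subst h <;> exact absurd hsp (by decide)
        rw [show aSkipWs (c :: r) = aSkipWs r from by simp [aSkipWs, hsp],
            show aFindNext (c :: r) = aFindNext r from by simp [aFindNext, hop]]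
        exact ih r.length (by simp) r rfl
      · rw [show aSkipWs (c :: r) = c :: r from by simp [aSkipWs, hsp]]
        by_cases hop : c = '[' ∨ c = '{'
        · rw [show aFindNext (c :: r) = c :: r from by simp [aFindNext, hop]]
        · rw [show aFindNext (c :: r) = aFindNext r from by simp [aFindNext, hop]]
          rw [aOuter.eq_def]
          simp only [if_neg hop]
          rw [skipWs_findNext]

theorem outer_corr (l : List Char) : bOuter l = aOuter (aFindNext l) := by
  induction hn : l.length using Nat.strong_induction_on generalizing l with
  | _ n ih =>
    subst hn
    cases l with
    | nil => simp [bOuter, aOuter, aFindNext]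
    | cons c r =>
      by_cases hop : c = '[' ∨ c = '{'
      · rw [show aFindNext (c :: r) = c :: r from by simp [aFindNext, hop]]
        rcases h2 : bParse (r.length + 1) c r with ⟨rem2, b2⟩
        have hm := main_corr (r.length + 1) r c [] rem2 b2 hop (by omega) h2
        cases b2 with
        | true =>
          have e1 : aLoop r [c] false false = (rem2, []) := by
            rw [hm.1 rfl, aLoop_nil]
          have hr2 : rem2.length ≤ r.length := by
            have := bParse_le (r.length + 1) c r; rw [h2] at this; exact this
          have etail : bOuter rem2 = aOuter (aSkipWs rem2) := by
            rw [ih rem2.length (by simp; omega) rem2 rfl, ← aOuter_skipWs_findNext]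
          simp only [bOuter.eq_2, aOuter.eq_2, if_pos hop, h2, e1, etail]
          simp
        | false =>
          have e1 := hm.2 rfl
          rcases h3 : aLoop r [c] false false with ⟨rm, stk⟩
          rw [h3] at e1
          simp only at e1
          simp only [bOuter.eq_2, aOuter.eq_2, if_pos hop, h2, h3, e1.1]
          rw [if_neg e1.2]
          simp [aSkipWs, aOuter]
      · rw [show aFindNext (c :: r) = aFindNext r from by simp [aFindNext, hop]]
        rw [bOuter.eq_def]
        simp only [if_neg hop]
        exact ih r.length (by simp) r rfl

-- ===== VERDICT (by name: the statement is the Claim_ definition above) =====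
theorem extract_top_level_json_values_py_spec : Claim_equal_extract_top_level_json_values_py := by
  intro text _
  unfold Spec_extract_top_level_json_values_py extract_top_level_json_values_py extract_top_level_json_values_py_alt
  rw [aOuter_skipWs_findNext, ← outer_corr]
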